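-- pv_equiv track=rewrite | github.com/broadinstitute/long-read-pipelines | docker/lr-cartographer/python/extract_bounded_read_sections.py | create_alignment_to_base_map
-- ===== SOURCE A (Python) =====
-- def create_alignment_to_base_map(alignment_string):
--     """
--     Create a dictionary mapping positions in the given alignment string back to the original string it came from.
--
--     Assumes that every base in the original string appears in the alignment string and the only additional characters
--     are '-' to represent insertions.
--
--     :param alignment_string: Alignment string containing original bases or '-' (to indicate insertions).
--     :return: A dict() mapping positions in the given alignment string back to the original string.
--     """
--
--     position_map = {i: i for i in range(len(alignment_string))}
--
--     o_pos = 0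
--     for i, c in enumerate(alignment_string):
--         position_map[i] = o_pos
--         if not c == "-":
--             o_pos += 1
--
--     return position_map
-- ===== SOURCE B (Python) =====
-- def create_alignment_to_base_map(alignment_string):
--     # Run-length construction: list the positions of the real bases, then emit
--     # constant segments of values between consecutive base positions.
--     bases = [i for i, c in enumerate(alignment_string) if c != "-"]
--     vals = []
--     prev = 0
--     for j, p in enumerate(bases):
--         vals.extend([j] * (p + 1 - prev))
--         prev = p + 1
--     vals.extend([len(bases)] * (len(alignment_string) - prev))
--     return dict(enumerate(vals))
-- ===== Notes on version B (the rewrite author's own statement) =====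
-- stated objective: alternative
-- what changed: Instead of walking every position with a running base counter, B first extracts the index list of non-gap positions and then emits the result as constant run-length segments ([j]*(width) between consecutive base positions), so the per-position counter disappears.
import Mathlib
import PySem

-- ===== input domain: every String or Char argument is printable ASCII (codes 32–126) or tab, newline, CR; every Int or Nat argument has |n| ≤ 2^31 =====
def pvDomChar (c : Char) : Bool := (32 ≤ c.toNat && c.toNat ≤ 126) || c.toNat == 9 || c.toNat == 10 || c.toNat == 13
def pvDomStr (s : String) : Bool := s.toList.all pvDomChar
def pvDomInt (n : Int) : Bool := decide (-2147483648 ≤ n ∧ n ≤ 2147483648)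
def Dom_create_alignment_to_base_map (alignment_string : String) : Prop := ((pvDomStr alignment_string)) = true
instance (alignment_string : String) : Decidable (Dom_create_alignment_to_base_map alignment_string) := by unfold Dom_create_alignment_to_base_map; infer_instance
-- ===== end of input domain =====

-- B drops A's per-position running counter: it extracts the list of non-gap positions first and
-- emits the map as constant run-length segments between consecutive base positions; objective: alternative.

-- ===== PORT A =====
-- the loop body: position_map[i] = o_pos; if not c == "-": o_pos += 1
def pvStepA (st : PySem.Dict Int Int × Int) (p : Int × Char) : PySem.Dict Int Int × Int :=
  (st.1.insert p.1 st.2, if ¬ (p.2 = '-') then st.2 + 1 else st.2)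

def create_alignment_to_base_map (alignment_string : String) : List (Int × Int) :=
  -- position_map = {i: i for i in range(len(alignment_string))}
  let position_map : PySem.Dict Int Int :=
    (PySem.List.pyRange 0 (PySem.Str.len alignment_string) 1).foldl
      (fun d i => d.insert i i) PySem.Dict.empty
  -- o_pos = 0; for i, c in enumerate(alignment_string): ...
  let final := (PySem.List.enumerate alignment_string.toList 0).foldl pvStepA (position_map, 0)
  final.1.items

-- ===== PORT B =====
-- the loop body: vals.extend([j] * (p + 1 - prev)); prev = p + 1
def pvStepB (st : List Int × Int) (jp : Int × Int) : List Int × Int :=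
  (st.1 ++ List.replicate (jp.2 + 1 - st.2).toNat jp.1, jp.2 + 1)

def create_alignment_to_base_map_alt (alignment_string : String) : List (Int × Int) :=
  -- bases = [i for i, c in enumerate(alignment_string) if c != "-"]
  let bases : List Int :=
    ((PySem.List.enumerate alignment_string.toList 0).filter (fun p => p.2 != '-')).map (·.1)
  -- vals = []; prev = 0; for j, p in enumerate(bases): ...
  let r := (PySem.List.enumerate bases 0).foldl pvStepB ([], 0)
  -- vals.extend([len(bases)] * (len(alignment_string) - prev))
  let vals := r.1 ++ List.replicate ((PySem.Str.len alignment_string - r.2).toNat) (bases.length : Int)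
  -- dict(enumerate(vals))
  ((PySem.List.enumerate vals 0).foldl (fun d p => d.insert p.1 p.2) PySem.Dict.empty).items

-- ===== PRECONDITION & SPEC =====
def Spec_create_alignment_to_base_map (alignment_string : String) (out : List (Int × Int)) : Prop := out = create_alignment_to_base_map_alt alignment_string
instance (alignment_string : String) (out : List (Int × Int)) : Decidable (Spec_create_alignment_to_base_map alignment_string out) := by unfold Spec_create_alignment_to_base_map; infer_instance

-- ===== CLAIM (what is proved, stated in full; the proofs are below) =====
def Claim_equal_create_alignment_to_base_map : Prop := ∀ (alignment_string : String), Dom_create_alignment_to_base_map alignment_string → Spec_create_alignment_to_base_map alignment_string (create_alignment_to_base_map alignment_string)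

-- ===== LEMMAS AND PROOFS =====

-- number of non-'-' characters, as a sum of 0/1 indicators
def pvCnt (l : List Char) : Int := (l.map (fun c => if c = '-' then (0 : Int) else 1)).sum

-- ---------- A side ----------

-- A's loop: getD of the resulting dict
theorem loopA_getD (l : List Char) : ∀ (s : Int) (d : PySem.Dict Int Int) (o k : Int),
    ((PySem.List.enumerate l s).foldl pvStepA (d, o)).1.getD k 0 =
      if s ≤ k ∧ k < s + (l.length : Int) then o + pvCnt (l.take (k - s).toNat)
      else d.getD k 0 := by
  induction l with
  | nil =>
    intro s d o k
    simp only [PySem.List.enumerate_nil, List.foldl_nil, List.length_nil,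
      Int.natCast_zero, Int.add_zero]
    rw [if_neg (by omega)]
  | cons c rest ih =>
    intro s d o k
    rw [PySem.List.enumerate_cons, List.foldl_cons]
    show ((PySem.List.enumerate rest (s+1)).foldl pvStepA
      (d.insert s o, if ¬ (c = '-') then o + 1 else o)).1.getD k 0 = _
    rw [ih]
    simp only [List.length_cons]
    by_cases hk : k = s
    · rw [hk]
      rw [if_neg (by omega), if_pos (by push_cast; omega), PySem.Dict.getD_insert_self,
        show ((s : Int) - s).toNat = 0 from by omega]
      simp [pvCnt]
    · rw [PySem.Dict.getD_insert_of_ne _ _ _ hk]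
      by_cases hin : s + 1 ≤ k ∧ k < s + 1 + (rest.length : Int)
      · rw [if_pos hin, if_pos (show s ≤ k ∧ k < s + ((rest.length : Nat) + 1 : Nat) by push_cast; omega)]
        have hB : pvCnt (List.take (k - s).toNat (c :: rest))
            = (if c = '-' then (0 : Int) else 1) + pvCnt (List.take (k - (s + 1)).toNat rest) := by
          rw [show (k - s).toNat = (k - (s + 1)).toNat + 1 from by omega, List.take_succ_cons]
          simp [pvCnt]
        rw [hB]
        split_ifs <;> ring
      · rw [if_neg hin, if_neg (show ¬ (s ≤ k ∧ k < s + ((rest.length : Nat) + 1 : Nat)) by push_cast; omega)]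

-- A's loop preserves the key list when every visited index is already a key
theorem loopA_keys (l : List Char) : ∀ (s : Int) (d : PySem.Dict Int Int) (o : Int),
    (∀ i : Int, s ≤ i → i < s + (l.length : Int) → d.contains i = true) →
    ((PySem.List.enumerate l s).foldl pvStepA (d, o)).1.keys = d.keys := by
  induction l with
  | nil => intro s d o _; simp [PySem.List.enumerate_nil]
  | cons c rest ih =>
    intro s d o h
    rw [PySem.List.enumerate_cons, List.foldl_cons]
    show ((PySem.List.enumerate rest (s+1)).foldl pvStepA
      (d.insert s o, if ¬ (c = '-') then o + 1 else o)).1.keys = _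
    rw [ih]
    · exact PySem.Dict.keys_insert_of_contains _ _ (h s le_rfl (by simp only [List.length_cons]; push_cast; omega))
    · intro i h1 h2
      rw [PySem.Dict.contains_insert]
      simp only [List.length_cons] at h
      have := h i (by omega) (by push_cast at h2 ⊢; omega)
      simp [this]

-- ---------- B side ----------

-- the base-position list of l, positions starting at s (B's comprehension)
def pvBases (l : List Char) (s : Int) : List Int :=
  ((PySem.List.enumerate l s).filter (fun p => p.2 != '-')).map (·.1)

theorem pvBases_nil (s : Int) : pvBases [] s = [] := by
  simp [pvBases, PySem.List.enumerate_nil]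

theorem pvBases_cons (c : Char) (rest : List Char) (s : Int) :
    pvBases (c :: rest) s = (if c = '-' then [] else [s]) ++ pvBases rest (s + 1) := by
  simp only [pvBases, PySem.List.enumerate_cons, List.filter_cons]
  by_cases hc : c = '-' <;> simp [hc]

theorem mem_pvBases (l : List Char) : ∀ (s x : Int), x ∈ pvBases l s → s ≤ x ∧ x < s + l.length := by
  induction l with
  | nil => intro s x hx; rw [pvBases_nil] at hx; simp at hx
  | cons c rest ih =>
    intro s x hx
    rw [pvBases_cons] at hx
    simp only [List.mem_append, List.length_cons] at hx ⊢
    rcases hx with hx | hx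
    · by_cases hc : c = '-'
      · rw [if_pos hc] at hx; simp at hx
      · rw [if_neg hc] at hx
        simp only [List.mem_singleton] at hx
        subst hx
        push_cast
        omega
    · have := ih (s + 1) x hx
      push_cast
      omega

-- the fold only appends to the accumulator
theorem foldB_acc (ps : List (Int × Int)) : ∀ (acc : List Int) (q : Int),
    ps.foldl pvStepB (acc, q) =
      (acc ++ (ps.foldl pvStepB ([], q)).1, (ps.foldl pvStepB ([], q)).2) := by
  induction ps with
  | nil => intro acc q; simp
  | cons p rest ih =>
    intro acc q
    simp only [List.foldl_cons, pvStepB, List.nil_append]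
    rw [ih (acc ++ List.replicate (p.2 + 1 - q).toNat p.1) (p.2 + 1),
        ih (List.replicate (p.2 + 1 - q).toNat p.1) (p.2 + 1)]
    simp

-- the whole of B's value construction (segments plus tail), parametrised by offsets
def pvSegs (l : List Char) (s j : Int) : List Int :=
  let r := (PySem.List.enumerate (pvBases l s) j).foldl pvStepB ([], s)
  r.1 ++ List.replicate ((s + l.length - r.2).toNat) (j + ((pvBases l s).length : Int))

theorem pvSegs_cons_gap (c : Char) (rest : List Char) (s j : Int) (hc : c = '-') :
    pvSegs (c :: rest) s j = j :: pvSegs rest (s + 1) j := by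
  unfold pvSegs
  simp only [pvBases_cons, if_pos hc, List.nil_append, List.length_cons]
  cases hbs : pvBases rest (s + 1) with
  | nil =>
    simp only [PySem.List.enumerate_nil, List.foldl_nil, List.length_nil, List.nil_append]
    rw [show ((s + ((rest.length : Nat) + 1 : Nat) : Int) - s).toNat
          = ((s + 1 + (rest.length : Int)) - (s + 1)).toNat + 1 from by push_cast; omega,
        List.replicate_succ]
    push_cast
    simp
  | cons p0 bs' =>
    have hp0 : s + 1 ≤ p0 := by
      have := mem_pvBases rest (s + 1) p0 (by rw [hbs]; exact List.mem_cons_self)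
      omega
    rw [PySem.List.enumerate_cons, List.foldl_cons, List.foldl_cons]
    simp only [pvStepB, List.nil_append]
    rw [foldB_acc _ (List.replicate (p0 + 1 - s).toNat j) (p0 + 1),
        foldB_acc _ (List.replicate (p0 + 1 - (s + 1)).toNat j) (p0 + 1)]
    rw [show (p0 + 1 - s).toNat = (p0 + 1 - (s + 1)).toNat + 1 from by omega, List.replicate_succ]
    simp only [List.cons_append, List.append_assoc]
    congr 4
    push_cast
    omega

theorem pvSegs_cons_base (c : Char) (rest : List Char) (s j : Int) (hc : ¬ c = '-') :
    pvSegs (c :: rest) s j = j :: pvSegs rest (s + 1) (j + 1) := by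
  unfold pvSegs
  simp only [pvBases_cons, if_neg hc, List.singleton_append, List.length_cons]
  rw [PySem.List.enumerate_cons, List.foldl_cons]
  simp only [pvStepB, List.nil_append]
  rw [show (s + 1 - s).toNat = 1 from by omega, List.replicate_one,
      foldB_acc _ [j] (s + 1)]
  set F := (PySem.List.enumerate (pvBases rest (s + 1)) (j + 1)).foldl pvStepB ([], s + 1) with hF
  simp only [List.cons_append, List.nil_append]
  congr 2
  rw [show ((s + ((rest.length + 1 : Nat) : Int)) - F.2).toNat
        = ((s + 1 + (rest.length : Int)) - F.2).toNat from by push_cast; omega,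
      show (j + (((pvBases rest (s + 1)).length + 1 : Nat) : Int))
        = j + 1 + ((pvBases rest (s + 1)).length : Int) from by push_cast; ring]

theorem pvSegs_eq (l : List Char) : ∀ (s j : Int),
    pvSegs l s j = (List.range l.length).map (fun k => j + pvCnt (l.take k)) := by
  induction l with
  | nil => intro s j; simp [pvSegs, pvBases_nil, PySem.List.enumerate_nil]
  | cons c rest ih =>
    intro s j
    have hrange : (List.range (rest.length + 1)).map (fun k => j + pvCnt ((c :: rest).take k))
        = j :: (List.range rest.length).map
            (fun k => (j + (if c = '-' then 0 else 1)) + pvCnt (rest.take k)) := by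
      rw [List.range_succ_eq_map, List.map_cons, List.map_map]
      simp only [List.take_zero, pvCnt, List.map_nil, List.sum_nil, Int.add_zero]
      congr 1
      apply List.map_congr_left
      intro k _
      simp only [Function.comp, List.take_succ_cons, List.map_cons, List.sum_cons]
      ring
    by_cases hc : c = '-'
    · rw [pvSegs_cons_gap c rest s j hc, ih (s + 1) j, List.length_cons, hrange, if_pos hc]
      simp
    · rw [pvSegs_cons_base c rest s j hc, ih (s + 1) (j + 1), List.length_cons, hrange, if_neg hc]

-- elementwise description of enumerate
theorem enumerate_getElem? {α : Type} (xs : List α) : ∀ (s : Int) (k : Nat),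
    (PySem.List.enumerate xs s)[k]? = xs[k]?.map (fun x => (s + (k : Int), x)) := by
  induction xs with
  | nil => intro s k; simp [PySem.List.enumerate_nil]
  | cons x rest ih =>
    intro s k
    cases k with
    | zero => simp [PySem.List.enumerate_cons]
    | succ m =>
      rw [PySem.List.enumerate_cons]
      simp only [List.getElem?_cons_succ, ih (s + 1) m]
      cases h : rest[m]? with
      | none => simp
      | some x =>
        simp only [Option.map_some, Option.some.injEq, Prod.mk.injEq]
        exact ⟨by push_cast; ring, trivial⟩

theorem create_alignment_to_base_map_spec_aux (s : String) :
    create_alignment_to_base_map s = create_alignment_to_base_map_alt s := by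
  unfold create_alignment_to_base_map create_alignment_to_base_map_alt
  simp only []
  set l := s.toList with hl
  set n : Int := PySem.Str.len s with hn
  have hnl : n = (l.length : Int) := by simp [hn, hl, PySem.Str.len]
  -- ---- A's value: items = pyRange paired with the prefix counts ----
  have hd0 : ((PySem.List.pyRange 0 n 1).foldl (fun d i => d.insert i i)
      PySem.Dict.empty).items = (PySem.List.pyRange 0 n 1).map (fun i => (i, i)) := by
    have := PySem.Dict.items_foldl_insert_fresh (PySem.List.pyRange 0 n 1)
      (fun i => i) (fun i => i) PySem.Dict.empty (by intro a _; simp)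
      (by simpa using PySem.List.nodup_pyRange_one 0 n)
    simpa using this
  set d0 := (PySem.List.pyRange 0 n 1).foldl (fun d i => d.insert i i) PySem.Dict.empty with hd0def
  have hkeys0 : d0.keys = PySem.List.pyRange 0 n 1 := by
    simp [PySem.Dict.keys, hd0, List.map_map, Function.comp_def]
  set fin := (PySem.List.enumerate l 0).foldl pvStepA (d0, 0) with hfin
  have hkeysf : fin.1.keys = PySem.List.pyRange 0 n 1 := by
    rw [hfin, loopA_keys, hkeys0]
    intro i h1 h2
    rw [PySem.Dict.contains_eq_decide_mem_keys, hkeys0]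
    simp only [PySem.List.mem_pyRange_one, decide_eq_true_eq]
    omega
  have hnodupf : fin.1.keys.Nodup := by rw [hkeysf]; exact PySem.List.nodup_pyRange_one 0 n
  rw [PySem.Dict.items_eq_map_keys fin.1 hnodupf 0, hkeysf]
  -- ---- B's value: the segment list is the prefix-count table ----
  have hbases : ((PySem.List.enumerate l 0).filter (fun p => p.2 != '-')).map (·.1)
      = pvBases l 0 := rfl
  rw [hbases]
  have hvalsF : ((PySem.List.enumerate (pvBases l 0) 0).foldl pvStepB ([], 0)).1
      ++ List.replicate ((n - ((PySem.List.enumerate (pvBases l 0) 0).foldl pvStepB ([], 0)).2).toNat)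
         ((pvBases l 0).length : Int)
      = (List.range l.length).map (fun k => (0 : Int) + pvCnt (l.take k)) := by
    rw [← pvSegs_eq l 0 0]
    unfold pvSegs
    rw [hnl]
    simp
  rw [hvalsF]
  -- dict(enumerate(vals)) over distinct fresh keys: items = the enumerated list
  have hnodupB : ((PySem.List.enumerate
      ((List.range l.length).map (fun k => (0 : Int) + pvCnt (l.take k))) 0).map (·.1)).Nodup := by
    rw [PySem.List.map_fst_enumerate]
    exact PySem.List.nodup_pyRange_one _ _
  have hitems := PySem.Dict.items_foldl_insert_fresh
    (PySem.List.enumerate ((List.range l.length).map (fun k => (0 : Int) + pvCnt (l.take k))) 0)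
    (·.1) (·.2) PySem.Dict.empty (by intro a _; simp) hnodupB
  rw [show (PySem.Dict.empty : PySem.Dict Int Int).items = [] from rfl, List.nil_append] at hitems
  rw [hitems]
  -- elementwise comparison
  apply List.ext_getElem
  · simp [PySem.List.length_pyRange_one, PySem.List.length_enumerate, hnl]
  · intro k hk1 hk2
    have hklt : k < l.length := by
      simp only [List.length_map, PySem.List.length_pyRange_one, hnl] at hk1
      omega
    have hR : ((PySem.List.enumerate
        ((List.range l.length).map (fun k => (0 : Int) + pvCnt (l.take k))) 0).map
          (fun p => (p.1, p.2)))[k]? = some (((k : Nat) : Int), pvCnt (l.take k)) := by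
      rw [List.getElem?_map, enumerate_getElem?]
      simp only [List.getElem?_map, List.getElem?_range hklt]
      simp
    have hR' := hR
    rw [List.getElem?_eq_getElem hk2] at hR'
    rw [Option.some.inj hR']
    rw [List.getElem_map, PySem.List.getElem_pyRange_one]
    have hget : fin.1.getD (0 + (k : Int)) 0 = pvCnt (l.take k) := by
      rw [hfin, loopA_getD, if_pos (by constructor <;> [omega; (push_cast; omega)])]
      rw [show ((0 + (k : Int)) - 0).toNat = k from by omega]
      ring
    rw [hget]
    norm_num

-- ===== VERDICT (by name: the statement is the Claim_ definition above) =====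
theorem create_alignment_to_base_map_spec : Claim_equal_create_alignment_to_base_map := by
  intro s _
  unfold Spec_create_alignment_to_base_map
  exact create_alignment_to_base_map_spec_aux s
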